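-- pv_equiv track=rewrite | github.com/patricknevindwyer/advent_of_code_2023 | aoc/days/day_03.py | number_neighbors
-- ===== SOURCE A (Python) =====
-- def number_neighbors(loc: tuple[int, int], num: int) -> list[tuple[int, int]]:
--     """
--     Generate the list of neighbor points for a number
--     at a location.
--
--     >>> number_neighbors((0, 0), 12)
--     [(-1, -1), (0, -1), (1, -1), (2, -1), (-1, 0), (2, 0), (-1, 1), (0, 1), (1, 1), (2, 1)]
--
--     :param loc:
--     :param num:
--     :return:
--     """
--     # basic coordinates
--     n_len = len(f"{num}")
--     x = loc[0]
--     y = loc[1]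
--
--     # boundaries
--     left = x - 1
--     right = x + n_len
--     top = y - 1
--     bottom = y + 1
--
--     neighbors = []
--
--     # top
--     for x_idx in range(left, right + 1):
--         neighbors.append((x_idx, top))
--
--     # left
--     neighbors.append((left, y))
--
--     # right
--     neighbors.append((right, y))
--
--     # bottom
--     for x_idx in range(left, right + 1):
--         neighbors.append((x_idx, bottom))
--
--     return neighbors
-- ===== SOURCE B (Python) =====
-- def number_neighbors(loc: tuple[int, int], num: int) -> list[tuple[int, int]]:
--     """One filtered sweep over the bounding box instead of four separate passes."""
--     n_len = len(f"{num}")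
--     x0, y0 = loc
--     left, right = x0 - 1, x0 + n_len
--     top, bottom = y0 - 1, y0 + 1
--     neighbors = []
--     for yy in range(top, bottom + 1):
--         for xx in range(left, right + 1):
--             if not (yy == y0 and left < xx < right):
--                 neighbors.append((xx, yy))
--     return neighbors
-- ===== Notes on version B (the rewrite author's own statement) =====
-- stated objective: simpler
-- what changed: Replaces the four separate passes (top row, left cell, right cell, bottom row) with one nested sweep over the whole bounding box that filters out the number's own cells, producing the same order.
import Mathlib
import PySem

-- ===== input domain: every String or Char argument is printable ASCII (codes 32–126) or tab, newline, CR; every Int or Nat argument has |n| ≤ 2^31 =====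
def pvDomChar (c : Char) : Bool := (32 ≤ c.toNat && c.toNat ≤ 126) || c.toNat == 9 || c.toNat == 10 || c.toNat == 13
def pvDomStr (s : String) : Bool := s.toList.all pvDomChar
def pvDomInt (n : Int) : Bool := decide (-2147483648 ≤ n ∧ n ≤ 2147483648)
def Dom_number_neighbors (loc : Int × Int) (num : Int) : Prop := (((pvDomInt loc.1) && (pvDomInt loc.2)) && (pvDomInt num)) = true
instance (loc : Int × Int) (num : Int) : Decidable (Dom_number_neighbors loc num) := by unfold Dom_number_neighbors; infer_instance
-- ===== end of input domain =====

-- B replaces A's four separate passes with one filtered sweep over the bounding box (simpler decomposition, same cost).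

-- ===== PORT A =====
def number_neighbors (loc : Int × Int) (num : Int) : List (Int × Int) :=
  let n_len : Int := ((PySem.Int.toStr num).length : Int)
  let x := loc.1
  let y := loc.2
  let left := x - 1
  let right := x + n_len
  let top := y - 1
  let bottom := y + 1
  let neighbors : List (Int × Int) := []
  -- top
  let neighbors := (PySem.List.pyRange left (right + 1) 1).foldl
    (fun acc x_idx => acc ++ [(x_idx, top)]) neighbors
  -- left
  let neighbors := neighbors ++ [(left, y)]
  -- right
  let neighbors := neighbors ++ [(right, y)]
  -- bottom
  let neighbors := (PySem.List.pyRange left (right + 1) 1).foldl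
    (fun acc x_idx => acc ++ [(x_idx, bottom)]) neighbors
  neighbors

-- ===== PORT B =====
def number_neighbors_alt (loc : Int × Int) (num : Int) : List (Int × Int) :=
  let n_len : Int := ((PySem.Int.toStr num).length : Int)
  let x0 := loc.1
  let y0 := loc.2
  let left := x0 - 1
  let right := x0 + n_len
  let top := y0 - 1
  let bottom := y0 + 1
  (PySem.List.pyRange top (bottom + 1) 1).foldl (fun acc yy =>
    (PySem.List.pyRange left (right + 1) 1).foldl (fun acc xx =>
      if ¬ (yy = y0 ∧ left < xx ∧ xx < right) then acc ++ [(xx, yy)] else acc) acc) []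

-- ===== PRECONDITION & SPEC =====
def Spec_number_neighbors (loc : Int × Int) (num : Int) (out : List (Int × Int)) : Prop := out = number_neighbors_alt loc num
instance (loc : Int × Int) (num : Int) (out : List (Int × Int)) : Decidable (Spec_number_neighbors loc num out) := by unfold Spec_number_neighbors; infer_instance

-- ===== CLAIM (what is proved, stated in full; the proofs are below) =====
def Claim_equal_number_neighbors : Prop := ∀ (loc : Int × Int) (num : Int), Dom_number_neighbors loc num → Spec_number_neighbors loc num (number_neighbors loc num)

-- ===== LEMMAS AND PROOFS =====

-- the middle row of B's sweep keeps exactly the two flanking cells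
lemma pv_mid_row (l r : Int) (h : l < r) :
    (PySem.List.pyRange l (r + 1) 1).filter (fun xx => decide ¬ (l < xx ∧ xx < r)) = [l, r] := by
  rw [PySem.List.pyRange_one_cons (show l < r + 1 by omega),
      PySem.List.pyRange_one_succ_right (show l + 1 ≤ r by omega)]
  have hmid : (PySem.List.pyRange (l + 1) r 1).filter (fun xx => decide ¬ (l < xx ∧ xx < r)) = [] := by
    apply List.filter_eq_nil_iff.mpr
    intro a ha
    have := PySem.List.mem_pyRange_one.mp ha
    simp; omega
  simp [List.filter_append]

-- a row of B's sweep away from the number's own row keeps every cell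
lemma pv_full_row (lo hi l r y0 yy : Int) (h : yy ≠ y0) :
    (PySem.List.pyRange lo hi 1).filter (fun xx => decide ¬ (yy = y0 ∧ l < xx ∧ xx < r)) =
      PySem.List.pyRange lo hi 1 := by
  apply List.filter_eq_self.mpr
  intro a _
  simp
  omega

-- ===== VERDICT (by name: the statement is the Claim_ definition above) =====
theorem number_neighbors_spec : Claim_equal_number_neighbors := by
  intro loc num _
  unfold Spec_number_neighbors number_neighbors number_neighbors_alt
  set n_len : Int := ((PySem.Int.toStr num).length : Int) with hn
  have hn0 : 0 ≤ n_len := by positivity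
  set x := loc.1
  set y := loc.2
  dsimp only
  have hrange : PySem.List.pyRange (y - 1) (y + 1 + 1) 1 = [y - 1, y, y + 1] := by
    rw [PySem.List.pyRange_one_cons (by omega), PySem.List.pyRange_one_cons (by omega),
        PySem.List.pyRange_one_cons (by omega), PySem.List.pyRange_one_eq_nil (by omega)]
    norm_num
  rw [hrange]
  simp only [List.foldl_cons, List.foldl_nil]
  rw [PySem.List.foldl_append_ite, PySem.List.foldl_append_ite, PySem.List.foldl_append_ite,
      PySem.List.foldl_append_singleton_eq_map, PySem.List.foldl_append_singleton_eq_map]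
  rw [pv_full_row (x - 1) (x + n_len + 1) (x - 1) (x + n_len) y (y - 1) (by omega),
      pv_full_row (x - 1) (x + n_len + 1) (x - 1) (x + n_len) y (y + 1) (by omega)]
  have hmid : (PySem.List.pyRange (x - 1) (x + n_len + 1) 1).filter
      (fun xx => decide ¬ (True ∧ x - 1 < xx ∧ xx < x + n_len)) = [x - 1, x + n_len] := by
    have hfun : (fun xx => decide ¬ (True ∧ x - 1 < xx ∧ xx < x + n_len))
        = (fun xx => decide ¬ (x - 1 < xx ∧ xx < x + n_len)) := by
      funext xx; simp
    rw [hfun]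
    exact pv_mid_row (x - 1) (x + n_len) (by omega)
  rw [hmid]
  simp
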